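-- pv_equiv track=rewrite | github.com/guilhermebs/AOC2024 | day04.py | find_xmas_dir
-- ===== SOURCE A (Python) =====
-- NEXT_LETTER = {"X": "M", "M": "A", "A": "S", "S": None}
--
-- def find_xmas_dir(grid, i, j, letter, dir):
--     if i < 0 or j < 0 or i >= len(grid) or j >= len(grid[0]):
--         return 0
--     if grid[i][j] != letter:
--         return 0
--     if NEXT_LETTER[letter] is None:
--         return 1
--     else:
--         return find_xmas_dir(grid, i + dir[0], j + dir[1], NEXT_LETTER[letter], dir)
-- ===== SOURCE B (Python) =====
-- # B: iterate over the precomputed remaining word ["X","M","A","S"][k:] with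
-- # multiplied offsets instead of chaining NEXT_LETTER recursively.
-- SUFFIX = {"X": ["X", "M", "A", "S"], "M": ["M", "A", "S"], "A": ["A", "S"], "S": ["S"]}
--
-- def find_xmas_dir(grid, i, j, letter, dir):
--     targets = SUFFIX.get(letter, [letter])
--     for k, ch in enumerate(targets):
--         r = i + k * dir[0]
--         c = j + k * dir[1]
--         if r < 0 or c < 0 or r >= len(grid) or c >= len(grid[0]) or grid[r][c] != ch:
--             return 0
--     return 1
-- ===== Notes on version B (the rewrite author's own statement) =====
-- stated objective: alternative
-- what changed: A recurses, re-looking up NEXT_LETTER at each step to find the next letter to match; B precomputes the whole remaining word from the start letter and runs one bounded loop checking cell (i+k*dir[0], j+k*dir[1]) against the k-th letter, with no recursion and no next-letter chaining.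
-- outside the precondition, e.g. on find_xmas_dir([['Q'], []], 0, 0, 'X', (1, 0)): A returns 0, B returns 0
import Mathlib
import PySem

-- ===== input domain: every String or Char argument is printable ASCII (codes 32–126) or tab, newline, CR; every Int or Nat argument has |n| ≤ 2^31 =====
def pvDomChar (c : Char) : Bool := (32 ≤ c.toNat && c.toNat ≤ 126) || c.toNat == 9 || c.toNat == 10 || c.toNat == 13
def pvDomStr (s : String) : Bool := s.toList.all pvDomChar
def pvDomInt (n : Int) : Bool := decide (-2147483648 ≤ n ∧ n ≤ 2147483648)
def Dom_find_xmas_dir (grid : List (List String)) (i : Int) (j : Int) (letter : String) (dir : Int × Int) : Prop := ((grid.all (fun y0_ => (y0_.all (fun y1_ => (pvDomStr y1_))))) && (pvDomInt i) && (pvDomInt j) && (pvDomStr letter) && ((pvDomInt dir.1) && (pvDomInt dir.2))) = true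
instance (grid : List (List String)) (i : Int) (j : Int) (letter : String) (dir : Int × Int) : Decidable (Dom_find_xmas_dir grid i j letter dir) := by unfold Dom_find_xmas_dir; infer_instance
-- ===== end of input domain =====

-- B replaces A's NEXT_LETTER tail recursion by a single bounded loop over the
-- precomputed remaining word (offsets k*dir); same return value, no speed claim.

-- ===== PORT A =====
def NEXT_LETTER : PySem.Dict String (Option String) :=
  PySem.Dict.mk [("X", some "M"), ("M", some "A"), ("A", some "S"), ("S", none)]

-- rank used only as the termination measure of the port of A's recursion
def pvRank (s : String) : Nat :=
  if s = "X" then 3 else if s = "M" then 2 else if s = "A" then 1 else 0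

theorem pvRank_next (l nl : String) (h : PySem.Dict.get? NEXT_LETTER l = some (some nl)) :
    pvRank nl < pvRank l := by
  by_cases h1 : l = "X"
  · subst h1; simp [NEXT_LETTER, PySem.Dict.get?] at h; subst h; decide
  · by_cases h2 : l = "M"
    · subst h2; simp [NEXT_LETTER, PySem.Dict.get?] at h; subst h; decide
    · by_cases h3 : l = "A"
      · subst h3; simp [NEXT_LETTER, PySem.Dict.get?] at h; subst h; decide
      · by_cases h4 : l = "S"
        · subst h4; simp [NEXT_LETTER, PySem.Dict.get?] at h
        · simp [NEXT_LETTER, PySem.Dict.get?, Ne.symm h1, Ne.symm h2, Ne.symm h3, Ne.symm h4] at h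

def find_xmas_dir (grid : List (List String)) (i : Int) (j : Int) (letter : String) (dir : Int × Int) : Int :=
  if i < 0 ∨ j < 0 ∨ (grid.length : Int) ≤ i ∨ ((grid.headD []).length : Int) ≤ j then 0
  else if PySem.List.pyGetD (PySem.List.pyGetD grid i []) j "" ≠ letter then 0
  else match h : PySem.Dict.get? NEXT_LETTER letter with
    | some none => 1
    | some (some nl) => find_xmas_dir grid (i + dir.1) (j + dir.2) nl dir
    | none => 0  -- Python raises KeyError here; excluded by Pre_
termination_by pvRank letter
decreasing_by exact pvRank_next letter nl h

-- ===== PORT B =====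
def SUFFIX : PySem.Dict String (List String) :=
  PySem.Dict.mk [("X", ["X", "M", "A", "S"]), ("M", ["M", "A", "S"]), ("A", ["A", "S"]), ("S", ["S"])]

-- the for-loop of Source B over `enumerate(targets)`
def altGo (grid : List (List String)) (i j : Int) (dir : Int × Int) : Nat → List String → Int
  | _, [] => 1
  | k, ch :: rest =>
    if i + (k : Int) * dir.1 < 0 ∨ j + (k : Int) * dir.2 < 0 ∨
       (grid.length : Int) ≤ i + (k : Int) * dir.1 ∨
       ((grid.headD []).length : Int) ≤ j + (k : Int) * dir.2 ∨
       PySem.List.pyGetD (PySem.List.pyGetD grid (i + (k : Int) * dir.1) []) (j + (k : Int) * dir.2) "" ≠ ch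
    then 0 else altGo grid i j dir (k + 1) rest

def find_xmas_dir_alt (grid : List (List String)) (i : Int) (j : Int) (letter : String) (dir : Int × Int) : Int :=
  altGo grid i j dir 0 (PySem.Dict.getD SUFFIX letter [letter])

-- ===== PRECONDITION & SPEC =====
-- Pre_ excludes (1) grids ragged along the ≤4-cell ray from (i,j) in direction dir, where the real
-- Python can raise IndexError (grid[i][j] is guarded only by len(grid[0])), and (2) a start letter
-- outside NEXT_LETTER whose in-bounds cell matches it, where A raises KeyError.
def Pre_find_xmas_dir (grid : List (List String)) (i : Int) (j : Int) (letter : String) (dir : Int × Int) : Prop :=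
  (∀ k ∈ ([0, 1, 2, 3] : List Int),
    (0 ≤ i + k * dir.1 ∧ i + k * dir.1 < (grid.length : Int) ∧
     0 ≤ j + k * dir.2 ∧ j + k * dir.2 < ((grid.headD []).length : Int)) →
    j + k * dir.2 < ((PySem.List.pyGetD grid (i + k * dir.1) []).length : Int)) ∧
  (letter = "X" ∨ letter = "M" ∨ letter = "A" ∨ letter = "S" ∨
    ¬(0 ≤ i ∧ i < (grid.length : Int) ∧ 0 ≤ j ∧ j < ((grid.headD []).length : Int) ∧
      PySem.List.pyGetD (PySem.List.pyGetD grid i []) j "" = letter))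
instance (grid : List (List String)) (i : Int) (j : Int) (letter : String) (dir : Int × Int) : Decidable (Pre_find_xmas_dir grid i j letter dir) := by unfold Pre_find_xmas_dir; infer_instance

def pvWitness_find_xmas_dir : List (List String) × Int × Int × String × (Int × Int) :=
  ([["X", "M", "A", "S"]], 0, 0, "X", (0, 1))

def Spec_find_xmas_dir (grid : List (List String)) (i : Int) (j : Int) (letter : String) (dir : Int × Int) (out : Int) : Prop := out = find_xmas_dir_alt grid i j letter dir
instance (grid : List (List String)) (i : Int) (j : Int) (letter : String) (dir : Int × Int) (out : Int) : Decidable (Spec_find_xmas_dir grid i j letter dir out) := by unfold Spec_find_xmas_dir; infer_instance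

-- ===== CLAIM (what is proved, stated in full; the proofs are below) =====
def Claim_equal_find_xmas_dir : Prop := ∀ (grid : List (List String)) (i : Int) (j : Int) (letter : String) (dir : Int × Int), Dom_find_xmas_dir grid i j letter dir → Pre_find_xmas_dir grid i j letter dir → Spec_find_xmas_dir grid i j letter dir (find_xmas_dir grid i j letter dir)

-- ===== LEMMAS AND PROOFS =====
theorem altGo_shift (grid : List (List String)) (i j : Int) (dir : Int × Int) (L : List String) (k : Nat) :
    altGo grid i j dir (k + 1) L = altGo grid (i + dir.1) (j + dir.2) dir k L := by
  induction L generalizing k with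
  | nil => simp [altGo]
  | cons ch rest ih =>
    have h1 : i + ((k : Nat) + 1 : Nat) * dir.1 = (i + dir.1) + (k : Int) * dir.1 := by push_cast; ring
    have h2 : j + ((k : Nat) + 1 : Nat) * dir.2 = (j + dir.2) + (k : Int) * dir.2 := by push_cast; ring
    simp only [altGo, h1, h2, ih]

theorem find_unfold (grid : List (List String)) (i j : Int) (letter : String) (dir : Int × Int) :
    find_xmas_dir grid i j letter dir =
      if i < 0 ∨ j < 0 ∨ (grid.length : Int) ≤ i ∨ ((grid.headD []).length : Int) ≤ j ∨
         PySem.List.pyGetD (PySem.List.pyGetD grid i []) j "" ≠ letter then 0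
      else match PySem.Dict.get? NEXT_LETTER letter with
        | some none => 1
        | some (some nl) => find_xmas_dir grid (i + dir.1) (j + dir.2) nl dir
        | none => 0 := by
  rw [find_xmas_dir]
  by_cases c1 : i < 0 ∨ j < 0 ∨ (grid.length : Int) ≤ i ∨ ((grid.headD []).length : Int) ≤ j
  · rw [if_pos c1, if_pos (by tauto)]
  · rw [if_neg c1]
    by_cases c2 : PySem.List.pyGetD (PySem.List.pyGetD grid i []) j "" ≠ letter
    · rw [if_pos c2, if_pos (by tauto)]
    · rw [if_neg c2, if_neg (by tauto)]
      split <;> rename_i heq <;> rw [heq]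

theorem eq_S (grid : List (List String)) (i j : Int) (dir : Int × Int) :
    find_xmas_dir grid i j "S" dir = altGo grid i j dir 0 ["S"] := by
  rw [find_unfold, show PySem.Dict.get? NEXT_LETTER "S" = some none from by decide]
  simp only [altGo, Nat.cast_zero, zero_mul, add_zero]

theorem eq_step (grid : List (List String)) (i j : Int) (dir : Int × Int) (l nl : String) (L : List String)
    (hm : PySem.Dict.get? NEXT_LETTER l = some (some nl))
    (hrec : find_xmas_dir grid (i + dir.1) (j + dir.2) nl dir = altGo grid (i + dir.1) (j + dir.2) dir 0 L) :
    find_xmas_dir grid i j l dir = altGo grid i j dir 0 (l :: L) := by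
  rw [find_unfold, hm]
  have hs := altGo_shift grid i j dir L 0
  norm_num at hs
  simp only [altGo, Nat.cast_zero, zero_mul, add_zero, hs, ← hrec]

theorem eq_A (grid : List (List String)) (i j : Int) (dir : Int × Int) :
    find_xmas_dir grid i j "A" dir = altGo grid i j dir 0 ["A", "S"] :=
  eq_step grid i j dir "A" "S" ["S"] (by decide) (eq_S grid _ _ dir)

theorem eq_M (grid : List (List String)) (i j : Int) (dir : Int × Int) :
    find_xmas_dir grid i j "M" dir = altGo grid i j dir 0 ["M", "A", "S"] :=
  eq_step grid i j dir "M" "A" ["A", "S"] (by decide) (eq_A grid _ _ dir)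

theorem eq_X (grid : List (List String)) (i j : Int) (dir : Int × Int) :
    find_xmas_dir grid i j "X" dir = altGo grid i j dir 0 ["X", "M", "A", "S"] :=
  eq_step grid i j dir "X" "M" ["M", "A", "S"] (by decide) (eq_M grid _ _ dir)

-- ===== VERDICT (by name: the statement is the Claim_ definition above) =====
theorem find_xmas_dir_spec : Claim_equal_find_xmas_dir := by
  intro grid i j letter dir _ hpre
  unfold Spec_find_xmas_dir find_xmas_dir_alt
  by_cases h1 : letter = "X"
  · subst h1; rw [show PySem.Dict.getD SUFFIX "X" ["X"] = ["X", "M", "A", "S"] from by decide]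
    exact eq_X grid i j dir
  by_cases h2 : letter = "M"
  · subst h2; rw [show PySem.Dict.getD SUFFIX "M" ["M"] = ["M", "A", "S"] from by decide]
    exact eq_M grid i j dir
  by_cases h3 : letter = "A"
  · subst h3; rw [show PySem.Dict.getD SUFFIX "A" ["A"] = ["A", "S"] from by decide]
    exact eq_A grid i j dir
  by_cases h4 : letter = "S"
  · subst h4; rw [show PySem.Dict.getD SUFFIX "S" ["S"] = ["S"] from by decide]
    exact eq_S grid i j dir
  -- letter outside NEXT_LETTER: both sides check only the start cell
  have hd : PySem.Dict.getD SUFFIX letter [letter] = [letter] := by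
    simp [SUFFIX, PySem.Dict.getD, PySem.Dict.get?, Ne.symm h1, Ne.symm h2, Ne.symm h3, Ne.symm h4]
  have hn : PySem.Dict.get? NEXT_LETTER letter = none := by
    simp [NEXT_LETTER, PySem.Dict.get?, Ne.symm h1, Ne.symm h2, Ne.symm h3, Ne.symm h4]
  rw [hd, find_unfold, hn]
  simp only [altGo, Nat.cast_zero, zero_mul, add_zero]
  split_ifs with c
  · rfl
  · exfalso
    simp only [not_or, not_lt, not_le, not_not] at c
    rcases hpre.2 with h | h | h | h | hnm
    · exact h1 h
    · exact h2 h
    · exact h3 h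
    · exact h4 h
    · exact hnm ⟨c.1, c.2.2.1, c.2.1, c.2.2.2.1, c.2.2.2.2⟩
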